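-- pv_equiv track=rewrite | github.com/salatt69/Insly2Pipedrive | helper.py | format_objects_to_html
-- ===== SOURCE A (Python) =====
-- def format_objects_to_html(objects):
--     """
--     Formats a list of vehicle objects into an HTML string.
--
--     Args:
--         objects (list of dict): A list of dictionaries, where each dictionary contains vehicle attributes.
--
--     Returns:
--         str: A formatted HTML string representing the vehicle details.
--
--     .. rubric:: Behavior
--     - Iterates through the list of vehicle objects.
--     - Escapes HTML special characters to prevent injection.
--     - Constructs an HTML list (`<ul>`) with each vehicle's attributes inside list items (`<li>`).
--     - Includes vehicle details such as type, license plate, make, model, VIN, year, power, gross weight, and owner.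
--     - Returns an HTML-formatted string with structured vehicle information.
--
--     Note:
--         - Uses the `escape()` function from `html` to prevent XSS vulnerabilities.
--         - Defaults missing values to `'N/A'` if a key is not found or has a `None` value.
--     """
--     from html import escape
--     html_content = "<h3>Policy Objects</h3><ul>"
--
--     for obj in objects:
--         html_content += "<li>"
--         html_content += f"<strong>Vehicle Type:</strong> {escape(obj.get('vehicle_type') or 'N/A')}<br>"
--         html_content += f"<strong>License Plate:</strong> {escape(obj.get('vehicle_licenseplate') or 'N/A')}<br>"
--         html_content += f"<strong>Make:</strong> {escape(obj.get('vehicle_make') or 'N/A')}<br>"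
--         html_content += f"<strong>Model:</strong> {escape(obj.get('vehicle_model') or 'N/A')}<br>"
--         html_content += f"<strong>VIN:</strong> {escape(obj.get('vehicle_vincode') or 'N/A')}<br>"
--         html_content += f"<strong>Year:</strong> {escape(obj.get('vehicle_year') or 'N/A')}<br>"
--         html_content += f"<strong>Power:</strong> {escape(obj.get('vehicle_power') or 'N/A')} HP<br>"
--         html_content += f"<strong>Gross Weight:</strong> {escape(obj.get('vehicle_grossweight') or 'N/A')} kg<br>"
--         html_content += f"<strong>Owner:</strong> {escape(obj.get('vehicle_owner_name') or 'N/A')}<br>"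
--         html_content += "</li><br>"
--
--     html_content += "</ul>"
--     return html_content
-- ===== SOURCE B (Python) =====
-- # html.escape(quote=True) re-implemented as a single translate pass
-- _ESC = {ord('&'): '&amp;', ord('<'): '&lt;', ord('>'): '&gt;',
--         ord('"'): '&quot;', ord("'"): '&#x27;'}
--
--
-- def escape(s):
--     return s.translate(_ESC)
--
-- _FIELDS = [
--     ("Vehicle Type:", "vehicle_type", ""),
--     ("License Plate:", "vehicle_licenseplate", ""),
--     ("Make:", "vehicle_make", ""),
--     ("Model:", "vehicle_model", ""),
--     ("VIN:", "vehicle_vincode", ""),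
--     ("Year:", "vehicle_year", ""),
--     ("Power:", "vehicle_power", " HP"),
--     ("Gross Weight:", "vehicle_grossweight", " kg"),
--     ("Owner:", "vehicle_owner_name", ""),
-- ]
--
--
-- def format_objects_to_html(objects):
--     items = "".join(
--         "<li>"
--         + "".join(
--             f"<strong>{label}</strong> {escape(obj.get(key) or 'N/A')}{suffix}<br>"
--             for label, key, suffix in _FIELDS
--         )
--         + "</li><br>"
--         for obj in objects
--     )
--     return "<h3>Policy Objects</h3><ul>" + items + "</ul>"
-- ===== Notes on version B (the rewrite author's own statement) =====
-- stated objective: simpler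
-- what changed: Replaces the nine unrolled string concatenations per object with one pass over a constant (label, key, suffix) field table, joining per-field strings and per-object items instead of repeatedly appending to an accumulator.
import Mathlib
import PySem

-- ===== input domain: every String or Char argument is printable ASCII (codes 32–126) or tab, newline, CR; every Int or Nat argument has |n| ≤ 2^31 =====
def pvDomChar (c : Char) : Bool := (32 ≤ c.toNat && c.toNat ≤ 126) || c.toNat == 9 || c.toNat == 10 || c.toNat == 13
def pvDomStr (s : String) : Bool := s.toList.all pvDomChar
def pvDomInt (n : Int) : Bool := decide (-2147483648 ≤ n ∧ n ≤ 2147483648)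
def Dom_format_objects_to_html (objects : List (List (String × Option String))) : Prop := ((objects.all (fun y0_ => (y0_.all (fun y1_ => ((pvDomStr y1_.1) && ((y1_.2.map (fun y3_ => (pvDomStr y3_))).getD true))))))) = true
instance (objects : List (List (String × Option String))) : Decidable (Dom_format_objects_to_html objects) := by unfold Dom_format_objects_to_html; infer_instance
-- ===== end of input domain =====

-- ===== PORT A =====
-- Header: B replaces A's nine unrolled per-field concatenations with one pass over a constant
-- (label, key, suffix) field table, joining the pieces; same output, objective: simpler.

-- html.escape (quote=True), exact: sequential replaces of & < > " ' equal this char-wise map,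
-- since '&' is replaced first and no replacement output re-triggers a later pattern.
def pyEscape (s : String) : String :=
  String.ofList (s.toList.flatMap (fun c =>
    if c = '&' then "&amp;".toList
    else if c = '<' then "&lt;".toList
    else if c = '>' then "&gt;".toList
    else if c = '"' then "&quot;".toList
    else if c = '\'' then "&#x27;".toList
    else [c]))

-- `obj.get(key) or 'N/A'`: dict.get is first-match lookup; None and "" are falsy.
def getOrNA (obj : List (String × Option String)) (key : String) : String :=
  match List.lookup key obj with
  | some (some s) => if s = "" then "N/A" else s
  | _ => "N/A"

def format_objects_to_html (objects : List (List (String × Option String))) : String :=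
  let html0 := "<h3>Policy Objects</h3><ul>"
  let html1 := objects.foldl (fun acc obj =>
    let acc := acc ++ "<li>"
    let acc := acc ++ "<strong>Vehicle Type:</strong> " ++ pyEscape (getOrNA obj "vehicle_type") ++ "<br>"
    let acc := acc ++ "<strong>License Plate:</strong> " ++ pyEscape (getOrNA obj "vehicle_licenseplate") ++ "<br>"
    let acc := acc ++ "<strong>Make:</strong> " ++ pyEscape (getOrNA obj "vehicle_make") ++ "<br>"
    let acc := acc ++ "<strong>Model:</strong> " ++ pyEscape (getOrNA obj "vehicle_model") ++ "<br>"
    let acc := acc ++ "<strong>VIN:</strong> " ++ pyEscape (getOrNA obj "vehicle_vincode") ++ "<br>"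
    let acc := acc ++ "<strong>Year:</strong> " ++ pyEscape (getOrNA obj "vehicle_year") ++ "<br>"
    let acc := acc ++ "<strong>Power:</strong> " ++ pyEscape (getOrNA obj "vehicle_power") ++ " HP<br>"
    let acc := acc ++ "<strong>Gross Weight:</strong> " ++ pyEscape (getOrNA obj "vehicle_grossweight") ++ " kg<br>"
    let acc := acc ++ "<strong>Owner:</strong> " ++ pyEscape (getOrNA obj "vehicle_owner_name") ++ "<br>"
    acc ++ "</li><br>") html0
  html1 ++ "</ul>"

-- ===== PORT B =====
def fieldSpecs : List (String × String × String) :=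
  [("Vehicle Type:", "vehicle_type", ""),
   ("License Plate:", "vehicle_licenseplate", ""),
   ("Make:", "vehicle_make", ""),
   ("Model:", "vehicle_model", ""),
   ("VIN:", "vehicle_vincode", ""),
   ("Year:", "vehicle_year", ""),
   ("Power:", "vehicle_power", " HP"),
   ("Gross Weight:", "vehicle_grossweight", " kg"),
   ("Owner:", "vehicle_owner_name", "")]

def format_objects_to_html_alt (objects : List (List (String × Option String))) : String :=
  "<h3>Policy Objects</h3><ul>"
  ++ String.join (objects.map (fun obj =>
       "<li>"
       ++ String.join (fieldSpecs.map (fun f =>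
            "<strong>" ++ f.1 ++ "</strong> " ++ pyEscape (getOrNA obj f.2.1) ++ f.2.2 ++ "<br>"))
       ++ "</li><br>"))
  ++ "</ul>"

-- ===== PRECONDITION & SPEC =====
def Spec_format_objects_to_html (objects : List (List (String × Option String))) (out : String) : Prop := out = format_objects_to_html_alt objects
instance (objects : List (List (String × Option String))) (out : String) : Decidable (Spec_format_objects_to_html objects out) := by unfold Spec_format_objects_to_html; infer_instance

-- ===== CLAIM (what is proved, stated in full; the proofs are below) =====
def Claim_equal_format_objects_to_html : Prop := ∀ (objects : List (List (String × Option String))), Dom_format_objects_to_html objects → Spec_format_objects_to_html objects (format_objects_to_html objects)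

-- ===== LEMMAS AND PROOFS =====


-- literal-merge facts (each a defeq on string literals)
lemma mf1 (x : String) : "<strong>" ++ ("Vehicle Type:" ++ ("</strong> " ++ x)) = "<strong>Vehicle Type:</strong> " ++ x := rfl
lemma mf2 (x : String) : "<strong>" ++ ("License Plate:" ++ ("</strong> " ++ x)) = "<strong>License Plate:</strong> " ++ x := rfl
lemma mf3 (x : String) : "<strong>" ++ ("Make:" ++ ("</strong> " ++ x)) = "<strong>Make:</strong> " ++ x := rfl
lemma mf4 (x : String) : "<strong>" ++ ("Model:" ++ ("</strong> " ++ x)) = "<strong>Model:</strong> " ++ x := rfl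
lemma mf5 (x : String) : "<strong>" ++ ("VIN:" ++ ("</strong> " ++ x)) = "<strong>VIN:</strong> " ++ x := rfl
lemma mf6 (x : String) : "<strong>" ++ ("Year:" ++ ("</strong> " ++ x)) = "<strong>Year:</strong> " ++ x := rfl
lemma mf7 (x : String) : "<strong>" ++ ("Power:" ++ ("</strong> " ++ x)) = "<strong>Power:</strong> " ++ x := rfl
lemma mf8 (x : String) : "<strong>" ++ ("Gross Weight:" ++ ("</strong> " ++ x)) = "<strong>Gross Weight:</strong> " ++ x := rfl
lemma mf9 (x : String) : "<strong>" ++ ("Owner:" ++ ("</strong> " ++ x)) = "<strong>Owner:</strong> " ++ x := rfl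
lemma mHP (x : String) : " HP" ++ ("<br>" ++ x) = " HP<br>" ++ x := rfl
lemma mkg (x : String) : " kg" ++ ("<br>" ++ x) = " kg<br>" ++ x := rfl
lemma mEmpty (x : String) : "" ++ x = x := rfl

-- per-object item produced by B's table pass
def itemB (obj : List (String × Option String)) : String :=
  "<li>"
  ++ String.join (fieldSpecs.map (fun f =>
       "<strong>" ++ f.1 ++ "</strong> " ++ pyEscape (getOrNA obj f.2.1) ++ f.2.2 ++ "<br>"))
  ++ "</li><br>"

lemma foldl_str_append (l : List String) (acc : String) :
    l.foldl (fun r s => r ++ s) acc = acc ++ String.join l := by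
  induction l generalizing acc with
  | nil => simp [String.join]
  | cons x xs ih =>
      show List.foldl _ (acc ++ x) xs = acc ++ String.join (x :: xs)
      have hj : String.join (x :: xs) = x ++ String.join xs := by
        show List.foldl _ ("" ++ x) xs = _
        rw [ih]; simp
      rw [ih, hj, String.append_assoc]

lemma foldl_append_join (l : List (List (String × Option String))) (acc : String) :
    l.foldl (fun a obj => a ++ itemB obj) acc = acc ++ String.join (l.map itemB) := by
  induction l generalizing acc with
  | nil => simp [String.join]
  | cons x xs ih =>
      show List.foldl _ (acc ++ itemB x) xs = acc ++ String.join (itemB x :: xs.map itemB)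
      have hj : String.join (itemB x :: xs.map itemB) = itemB x ++ String.join (xs.map itemB) := by
        show List.foldl _ ("" ++ itemB x) _ = _
        rw [foldl_str_append]; simp
      rw [ih, hj, String.append_assoc]

set_option maxRecDepth 8192 in
set_option maxHeartbeats 2000000 in
theorem format_objects_to_html_spec : Claim_equal_format_objects_to_html := by
  intro objects _
  show format_objects_to_html objects = format_objects_to_html_alt objects
  unfold format_objects_to_html format_objects_to_html_alt
  have hstep : (fun (acc : String) (obj : List (String × Option String)) =>
      let acc := acc ++ "<li>"
      let acc := acc ++ "<strong>Vehicle Type:</strong> " ++ pyEscape (getOrNA obj "vehicle_type") ++ "<br>"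
      let acc := acc ++ "<strong>License Plate:</strong> " ++ pyEscape (getOrNA obj "vehicle_licenseplate") ++ "<br>"
      let acc := acc ++ "<strong>Make:</strong> " ++ pyEscape (getOrNA obj "vehicle_make") ++ "<br>"
      let acc := acc ++ "<strong>Model:</strong> " ++ pyEscape (getOrNA obj "vehicle_model") ++ "<br>"
      let acc := acc ++ "<strong>VIN:</strong> " ++ pyEscape (getOrNA obj "vehicle_vincode") ++ "<br>"
      let acc := acc ++ "<strong>Year:</strong> " ++ pyEscape (getOrNA obj "vehicle_year") ++ "<br>"
      let acc := acc ++ "<strong>Power:</strong> " ++ pyEscape (getOrNA obj "vehicle_power") ++ " HP<br>"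
      let acc := acc ++ "<strong>Gross Weight:</strong> " ++ pyEscape (getOrNA obj "vehicle_grossweight") ++ " kg<br>"
      let acc := acc ++ "<strong>Owner:</strong> " ++ pyEscape (getOrNA obj "vehicle_owner_name") ++ "<br>"
      acc ++ "</li><br>") = (fun acc obj => acc ++ itemB obj) := by
    funext acc obj
    show _ = acc ++ itemB obj
    simp only [itemB, fieldSpecs, List.map, String.join, List.foldl, String.append_assoc,
      mf1, mf2, mf3, mf4, mf5, mf6, mf7, mf8, mf9, mHP, mkg, mEmpty]
  have hmap : (fun obj : List (String × Option String) =>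
      "<li>"
      ++ String.join (fieldSpecs.map (fun f =>
           "<strong>" ++ f.1 ++ "</strong> " ++ pyEscape (getOrNA obj f.2.1) ++ f.2.2 ++ "<br>"))
      ++ "</li><br>") = itemB := funext fun obj => rfl
  simp only [hstep, hmap]
  rw [foldl_append_join]
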